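-- pv_equiv track=rewrite | github.com/Lerjebo/Advent-of-Code-2020 | Day11.py | seating2
-- ===== SOURCE A (Python) =====
-- def seating2(data):
--     current_state = data.copy()
--     prev_state = []
--     i = 0
--     tot = 0
--     while current_state != prev_state:
--         prev_state = current_state
--         if i % 2 == 0:
--             current_state = occupy(prev_state, False)
--         else:
--             current_state, tot = clear(prev_state, 1)
--         i += 1
--     return tot
--
-- def clear(data, part1=0):
--     prev_state = data
--     next_state = []
--     neigh = []
--     tot_count = 0
--     for r, row in enumerate(prev_state):
--         next_row = []
--         for c, col in enumerate(row):
--             if col == "#":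
--                 if part1 == 0:
--                     neigh = check_neighbors(prev_state, r, c)
--                 else:
--                     neigh = next_neighbor(prev_state, [r, c])
--                 count = ''.join(neigh).count("#")
--                 if count >= 4+part1:
--                     next_row.append("L")
--                 else:
--                     tot_count += 1
--                     next_row.append(col)
--             else:
--                 next_row.append(col)
--         next_state.append(next_row)
--     return next_state, tot_count
--
-- def occupy(data, part1=True):
--     prev_state = data
--     next_state = []
--     neigh = []
--     for r, row in enumerate(prev_state):
--         next_row = []
--         for c, col in enumerate(row):
--             if col == "L":
--                 if part1:
--                     neigh = check_neighbors(prev_state, r, c)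
--                 else:
--                     neigh = next_neighbor(prev_state, [r, c])
--                 if "#" not in neigh:
--                     next_row.append("#")
--                 else:
--                     next_row.append(col)
--             else:
--                 next_row.append(col)
--         next_state.append(next_row)
--     return next_state
--
-- def check_neighbors(data, row, col):
--     neighbors = []
--
--     if row > 0:
--         neighbors.append(data[row - 1][col])
--         if col > 0:
--             neighbors.append(data[row - 1][col - 1])
--         if col < len(data[row])-1:
--             neighbors.append(data[row - 1][col + 1])
--     if row < len(data)-1:
--         neighbors.append(data[row + 1][col])
--         if col > 0:
--             neighbors.append(data[row + 1][col - 1])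
--         if col < len(data[row])-1:
--             neighbors.append(data[row + 1][col + 1])
--     if col > 0:
--         neighbors.append(data[row][col - 1])
--     if col < len(data[row])-1:
--         neighbors.append(data[row][col + 1])
--     return neighbors
--
-- def locate_neighbor(data, y, x, y1, x1):
--     x += x1
--     y += y1
--     if x < 0 or x > len(data[0])-1 or y < 0 or y > len(data)-1:
--         return ""
--     while data[y][x] == ".":
--         x += x1
--         y += y1
--         if x < 0 or y > len(data)-1 or y < 0 or x > len(data[0])-1:
--             return ""
--     return data[y][x]
--
-- def next_neighbor(data, coord):
--     steps = [[1, 0], [1, -1], [1, 1], [-1, -1], [-1, 0], [-1, 1], [0, 1], [0, -1]]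
--     neighbors = []
--     for step in steps:
--         neighbors.append(locate_neighbor(data, coord[0], coord[1], step[0], step[1]))
--     return neighbors
-- ===== SOURCE B (Python) =====
-- def seating2(data):
--     grid = [list(row) for row in data]
--     R = len(grid)
--     if R == 0:
--         return 0
--     dirs = [(1, 0), (1, -1), (1, 1), (-1, -1), (-1, 0), (-1, 1), (0, 1), (0, -1)]
--     # precompute, once, the coordinate of the first non-floor cell in each of the
--     # 8 directions (the floor pattern never changes, so these are valid forever)
--     nbrs = []
--     for r in range(R):
--         row_n = []
--         for c in range(len(grid[r])):
--             lst = []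
--             if grid[r][c] not in ("L", "#"):
--                 row_n.append(lst)
--                 continue
--             for dy, dx in dirs:
--                 y, x = r + dy, c + dx
--                 while 0 <= y < R and 0 <= x < len(grid[y]) and grid[y][x] == ".":
--                     y += dy
--                     x += dx
--                 if 0 <= y < R and 0 <= x < len(grid[y]):
--                     lst.append((y, x))
--             row_n.append(lst)
--         nbrs.append(row_n)
--
--     def occ(prev):
--         return [["#" if cell == "L" and not any(prev[y][x] == "#" for (y, x) in nbrs[r][c]) else cell
--                  for c, cell in enumerate(row)]
--                 for r, row in enumerate(prev)]
--
--     def clr(prev):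
--         nxt = [["L" if cell == "#" and sum(prev[y][x].count("#") for (y, x) in nbrs[r][c]) >= 5 else cell
--                 for c, cell in enumerate(row)]
--                for r, row in enumerate(prev)]
--         tot = sum(1 for r, row in enumerate(prev) for c, cell in enumerate(row)
--                   if cell == "#" and sum(prev[y][x].count("#") for (y, x) in nbrs[r][c]) < 5)
--         return nxt, tot
--
--     cur, prev = grid, None
--     i = 0
--     tot = 0
--     while cur != prev:
--         prev = cur
--         if i % 2 == 0:
--             cur = occ(prev)
--         else:
--             cur, tot = clr(prev)
--         i += 1
--     return tot
-- ===== Notes on version B (the rewrite author's own statement) =====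
-- stated objective: alternative
-- what changed: B precomputes each seat cell's 8 line-of-sight neighbor coordinates once from the static floor pattern and each simulation step only looks them up, instead of A's re-walking all 8 rays from every seat on every step; measured cost on the generated inputs is not better, so no speed is claimed.
-- outside the precondition, e.g. on seating2([[], ['L', '#']]): A returns 2, B returns 0; on seating2([['L', 'L'], ['L']]): A raises IndexError, B returns 3
import Mathlib
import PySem

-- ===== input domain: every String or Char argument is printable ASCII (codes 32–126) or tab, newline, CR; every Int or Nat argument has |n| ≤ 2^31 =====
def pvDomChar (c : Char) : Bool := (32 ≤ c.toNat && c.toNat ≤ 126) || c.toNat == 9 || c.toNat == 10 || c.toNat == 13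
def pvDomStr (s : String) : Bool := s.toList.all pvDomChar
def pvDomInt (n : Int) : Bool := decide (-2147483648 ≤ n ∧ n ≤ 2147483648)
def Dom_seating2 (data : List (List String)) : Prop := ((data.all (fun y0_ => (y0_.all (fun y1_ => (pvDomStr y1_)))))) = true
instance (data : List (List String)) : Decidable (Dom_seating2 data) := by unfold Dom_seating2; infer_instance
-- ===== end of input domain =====

-- B replaces A's per-step line-of-sight rescans by neighbor coordinate lists computed once
-- per seat cell, so each simulation step only looks coordinates up (objective: alternative
-- algorithm, same measured cost on the tested inputs); equivalence is about the return
-- value (neither version mutates its argument observably).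

-- grid[y][x] (both Pythons index rows/cells like this; exact where the guards in the code
-- have established 0 ≤ y < len(grid), 0 ≤ x < len(grid[y]), the only places it is used)
def pvCell (g : List (List String)) (y x : Int) : String :=
  PySem.List.pyGetD (PySem.List.pyGetD g y []) x ""

-- shared totalization fuel for the visibility walk: a walk moves by a nonzero step each
-- iteration, so it leaves the grid within len(g) + len(g[0]) steps (a fuel guard only,
-- not an algorithm switch)
def pvScanFuel (g : List (List String)) : Nat := g.length + (g.headD []).length + 1

-- shared totalization fuel for the until-stable loop: before termination no (state, parity)
-- pair repeats, and at most 2^(#seat cells) states arise (a fuel guard only)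
def pvLoopFuel (g : List (List String)) : Nat :=
  2 * 2 ^ ((g.map (fun row => row.countP (fun c => c == "L" || c == "#"))).sum) + 2

-- ===== PORT A =====
-- the while-loop of locate_neighbor (cell is read only where the guards hold)
def aLocLoop (g : List (List String)) (y1 x1 : Int) : Nat → Int → Int → String
  | 0, _, _ => ""
  | f+1, y, x =>
    if pvCell g y x = "." then
      let x' := x + x1
      let y' := y + y1
      if x' < 0 ∨ y' > PySem.List.len g - 1 ∨ y' < 0 ∨ x' > PySem.List.len (g.headD []) - 1 then ""
      else aLocLoop g y1 x1 f y' x'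
    else pvCell g y x

def aLocate (g : List (List String)) (y x y1 x1 : Int) : String :=
  let x' := x + x1
  let y' := y + y1
  if x' < 0 ∨ x' > PySem.List.len (g.headD []) - 1 ∨ y' < 0 ∨ y' > PySem.List.len g - 1 then ""
  else aLocLoop g y1 x1 (pvScanFuel g) y' x'

def aSteps : List (Int × Int) :=
  [(1, 0), (1, -1), (1, 1), (-1, -1), (-1, 0), (-1, 1), (0, 1), (0, -1)]

def aNextNeighbor (g : List (List String)) (y x : Int) : List String :=
  aSteps.map (fun st => aLocate g y x st.1 st.2)

def aCheckNeighbors (g : List (List String)) (row col : Int) : List String :=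
  let lenRow := PySem.List.len (PySem.List.pyGetD g row [])
  (if row > 0 then
     [pvCell g (row-1) col]
     ++ (if col > 0 then [pvCell g (row-1) (col-1)] else [])
     ++ (if col < lenRow - 1 then [pvCell g (row-1) (col+1)] else [])
   else [])
  ++ (if row < PySem.List.len g - 1 then
     [pvCell g (row+1) col]
     ++ (if col > 0 then [pvCell g (row+1) (col-1)] else [])
     ++ (if col < lenRow - 1 then [pvCell g (row+1) (col+1)] else [])
   else [])
  ++ (if col > 0 then [pvCell g row (col-1)] else [])
  ++ (if col < lenRow - 1 then [pvCell g row (col+1)] else [])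

def aOccupy (g : List (List String)) (part1 : Bool) : List (List String) :=
  (PySem.List.enumerate g).map (fun rrow =>
    (PySem.List.enumerate rrow.2).map (fun ccol =>
      if ccol.2 = "L" then
        let neigh := if part1 then aCheckNeighbors g rrow.1 ccol.1
                     else aNextNeighbor g rrow.1 ccol.1
        if "#" ∉ neigh then "#" else ccol.2
      else ccol.2))

def aClear (g : List (List String)) (part1 : Int) : List (List String) × Int :=
  (PySem.List.enumerate g).foldl (fun acc rrow =>
    let inner := (PySem.List.enumerate rrow.2).foldl (fun (ac2 : List String × Int) ccol =>
      if ccol.2 = "#" then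
        let neigh := if part1 = 0 then aCheckNeighbors g rrow.1 ccol.1
                     else aNextNeighbor g rrow.1 ccol.1
        let count := PySem.Str.count (PySem.Str.join "" neigh) "#"
        if (count : Int) ≥ 4 + part1 then (ac2.1 ++ ["L"], ac2.2)
        else (ac2.1 ++ [ccol.2], ac2.2 + 1)
      else (ac2.1 ++ [ccol.2], ac2.2)) ([], acc.2)
    (acc.1 ++ [inner.1], inner.2)) ([], 0)

def aLoop : Nat → List (List String) → List (List String) → Int → Int → Int
  | 0, _, _, _, tot => tot
  | f+1, cur, prev, i, tot =>
    if cur = prev then tot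
    else if PySem.Int.mod i 2 = 0 then aLoop f (aOccupy cur false) cur (i+1) tot
    else aLoop f (aClear cur 1).1 cur (i+1) (aClear cur 1).2

def seating2 (data : List (List String)) : Int :=
  aLoop (pvLoopFuel data) data [] 0 0

-- ===== PORT B =====
-- B's visibility walk over the ORIGINAL grid: first non-floor coordinate in direction (dy,dx)
def bScan (g : List (List String)) (dy dx : Int) : Nat → Int → Int → Option (Int × Int)
  | 0, _, _ => none
  | f+1, y, x =>
    if 0 ≤ y ∧ y < PySem.List.len g ∧ 0 ≤ x ∧ x < PySem.List.len (PySem.List.pyGetD g y []) then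
      if pvCell g y x = "." then bScan g dy dx f (y + dy) (x + dx)
      else some (y, x)
    else none

def bDirs : List (Int × Int) :=
  [(1, 0), (1, -1), (1, 1), (-1, -1), (-1, 0), (-1, 1), (0, 1), (0, -1)]

-- the per-cell neighbor lists, computed ONCE from the input grid
def bTable (g : List (List String)) : List (List (List (Int × Int))) :=
  (PySem.List.enumerate g).map (fun rrow =>
    (PySem.List.enumerate rrow.2).map (fun ccol =>
      if ccol.2 == "L" || ccol.2 == "#" then
        bDirs.filterMap (fun d => bScan g d.1 d.2 (pvScanFuel g) (rrow.1 + d.1) (ccol.1 + d.2))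
      else []))

def bNbrs (tab : List (List (List (Int × Int)))) (r c : Int) : List (Int × Int) :=
  PySem.List.pyGetD (PySem.List.pyGetD tab r []) c []

def bOcc (tab : List (List (List (Int × Int)))) (s : List (List String)) : List (List String) :=
  (PySem.List.enumerate s).map (fun rrow =>
    (PySem.List.enumerate rrow.2).map (fun ccol =>
      if ccol.2 == "L" && !((bNbrs tab rrow.1 ccol.1).any fun q => pvCell s q.1 q.2 == "#") then "#"
      else ccol.2))

def bCount (tab : List (List (List (Int × Int)))) (s : List (List String)) (r c : Int) : Nat :=
  ((bNbrs tab r c).map (fun q => PySem.Str.count (pvCell s q.1 q.2) "#")).sum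

def bClr (tab : List (List (List (Int × Int)))) (s : List (List String)) : List (List String) :=
  (PySem.List.enumerate s).map (fun rrow =>
    (PySem.List.enumerate rrow.2).map (fun ccol =>
      if ccol.2 == "#" && decide (5 ≤ bCount tab s rrow.1 ccol.1) then "L" else ccol.2))

def bTot (tab : List (List (List (Int × Int)))) (s : List (List String)) : Int :=
  ((PySem.List.enumerate s).map (fun rrow =>
    ((PySem.List.enumerate rrow.2).map (fun ccol =>
      if ccol.2 == "#" && decide (bCount tab s rrow.1 ccol.1 < 5) then (1 : Int) else 0)).sum)).sum

def bLoop (tab : List (List (List (Int × Int)))) :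
    Nat → List (List String) → List (List String) → Int → Int → Int
  | 0, _, _, _, tot => tot
  | f+1, cur, prev, i, tot =>
    if cur = prev then tot
    else if PySem.Int.mod i 2 = 0 then bLoop tab f (bOcc tab cur) cur (i+1) tot
    else bLoop tab f (bClr tab cur) cur (i+1) (bTot tab cur)

def seating2_alt (data : List (List String)) : Int :=
  if data.length = 0 then 0
  else bLoop (bTable data) (pvLoopFuel data) data [] 0 0

-- ===== PRECONDITION & SPEC =====
-- Pre_ excludes ragged grids that contain a seat cell ("L"/"#"): there A's line-of-sight
-- scan, whose column bound is len(data[0]) but whose rows vary in length, raises IndexError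
-- on most of them and on the rest returns values that are artefacts of that wrong bound.
def Pre_seating2 (data : List (List String)) : Prop :=
  (∀ row ∈ data, row.length = (data.headD []).length) ∨
  (∀ row ∈ data, ∀ c ∈ row, c ≠ "L" ∧ c ≠ "#")
instance (data : List (List String)) : Decidable (Pre_seating2 data) := by
  unfold Pre_seating2; infer_instance

def pvWitness_seating2 : List (List String) := [["L", "."], ["#", "L"]]

def Spec_seating2 (data : List (List String)) (out : Int) : Prop := out = seating2_alt data
instance (data : List (List String)) (out : Int) : Decidable (Spec_seating2 data out) := by
  unfold Spec_seating2; infer_instance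

-- ===== CLAIM (what is proved, stated in full; the proofs are below) =====
def Claim_equal_seating2 : Prop :=
  ∀ (data : List (List String)), Dom_seating2 data → Pre_seating2 data →
    Spec_seating2 data (seating2 data)

-- ===== LEMMAS AND PROOFS =====

-- rectangular grid: every row has the length of row 0
def pvRect (g : List (List String)) : Prop := ∀ row ∈ g, row.length = (g.headD []).length

-- cell access with Nat indices (for stating the invariant)
def pvCellN (g : List (List String)) (r c : Nat) : String := (g.getD r []).getD c ""

-- the invariant tying a simulation state s to the original grid d: same shape, and each
-- cell is either unchanged or a seat that was already a seat in d (so same floor pattern)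
def pvSD (d s : List (List String)) : Prop :=
  s.length = d.length ∧
  (∀ r : Nat, (s.getD r []).length = (d.getD r []).length) ∧
  (∀ r c : Nat, pvCellN s r c = pvCellN d r c ∨
    ((pvCellN s r c = "L" ∨ pvCellN s r c = "#") ∧
     (pvCellN d r c = "L" ∨ pvCellN d r c = "#")))

lemma sd_dot {d s : List (List String)} (h : pvSD d s) (r c : Nat) :
    pvCellN s r c = "." ↔ pvCellN d r c = "." := by
  rcases h.2.2 r c with heq | ⟨hs, hd⟩
  · rw [heq]
  · constructor
    · intro hc; rcases hs with h1 | h1 <;> (rw [hc] at h1; simp at h1)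
    · intro hc; rcases hd with h1 | h1 <;> (rw [hc] at h1; simp at h1)

lemma pvCell_eq (g : List (List String)) (y x : Int) (hy : 0 ≤ y) (hx : 0 ≤ x) :
    pvCell g y x = pvCellN g y.toNat x.toNat := by
  simp only [pvCell, pvCellN, PySem.List.pyGetD, PySem.List.pyGet?_of_nonneg _ hy,
    PySem.List.pyGet?_of_nonneg _ hx, List.getD_eq_getElem?_getD]

lemma cellN_in (s : List (List String)) (r c : Nat) (hr : r < s.length)
    (hc : c < s[r].length) : pvCellN s r c = s[r][c] := by
  rw [pvCellN, List.getD_eq_getElem s [] hr, List.getD_eq_getElem (s[r]) "" hc]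

lemma cellN_out (s : List (List String)) (r c : Nat)
    (h : ¬ (r < s.length ∧ c < (s.getD r []).length)) : pvCellN s r c = "" := by
  rw [pvCellN]
  by_cases hr : r < s.length
  · rw [List.getD_eq_getElem s [] hr] at h ⊢
    exact List.getD_eq_default _ _ (by omega)
  · rw [List.getD_eq_default s _ (by omega)]
    rfl

lemma headD_len (g : List (List String)) : (g.headD []).length = (g.getD 0 []).length := by
  cases g <;> simp

lemma sd_refl (d : List (List String)) : pvSD d d := by
  exact ⟨rfl, fun _ => rfl, fun _ _ => Or.inl rfl⟩

lemma sd_scanFuel {d s : List (List String)} (h : pvSD d s) : pvScanFuel s = pvScanFuel d := by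
  rw [pvScanFuel, pvScanFuel, h.1, headD_len, headD_len, h.2.1 0]

lemma bScan_oob (g : List (List String)) (dy dx : Int) (f : Nat) (y x : Int)
    (h : ¬ (0 ≤ y ∧ y < PySem.List.len g ∧ 0 ≤ x ∧
            x < PySem.List.len (PySem.List.pyGetD g y []))) :
    bScan g dy dx f y x = none := by
  cases f with
  | zero => rfl
  | succ n => simp only [bScan]; rw [if_neg h]

lemma scan_agree {d s : List (List String)} (hSD : pvSD d s) (hR : pvRect d)
    (y1 x1 : Int) :
    ∀ (f : Nat) (y x : Int), 0 ≤ y → y < (d.length : Int) → 0 ≤ x →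
      x < ((d.getD y.toNat []).length : Int) →
      aLocLoop s y1 x1 f y x =
        (match bScan d y1 x1 f y x with
         | none => ""
         | some q => pvCell s q.1 q.2) := by
  intro f
  induction f with
  | zero => intro y x _ _ _ _; rfl
  | succ f ih =>
    intro y x hy0 hyR hx0 hxC
    have hyN : y.toNat < d.length := by omega
    have hxN : x.toNat < (d.getD y.toNat []).length := by omega
    have hguard : 0 ≤ y ∧ y < PySem.List.len d ∧ 0 ≤ x ∧
        x < PySem.List.len (PySem.List.pyGetD d y []) := by
      refine ⟨hy0, ?_, hx0, ?_⟩
      · simpa [PySem.List.len_eq] using hyR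
      · rw [PySem.List.len_eq, show y = ((y.toNat : Nat) : Int) from (Int.toNat_of_nonneg hy0).symm,
          PySem.List.pyGetD_natCast]
        exact hxC
    have hdot : (pvCell s y x = ".") ↔ (pvCell d y x = ".") := by
      rw [pvCell_eq s y x hy0 hx0, pvCell_eq d y x hy0 hx0]
      exact sd_dot hSD y.toNat x.toNat
    simp only [aLocLoop, bScan, if_pos hguard]
    by_cases hdots : pvCell s y x = "."
    · have hdotd : pvCell d y x = "." := hdot.mp hdots
      rw [if_pos hdots, if_pos hdotd]
      set y' := y + y1 with hy'
      set x' := x + x1 with hx'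
      by_cases hvert : 0 ≤ y' ∧ y' < (d.length : Int)
      · have hmem : d.getD y'.toNat [] ∈ d := by
          rw [List.getD_eq_getElem d [] (by omega)]
          exact List.getElem_mem _
        have hlenrow : (d.getD y'.toNat []).length = (d.headD []).length := hR _ hmem
        have hlens : PySem.List.len s = (d.length : Int) := by
          rw [PySem.List.len_eq, hSD.1]
        have hlens0 : PySem.List.len (s.headD []) = ((d.headD []).length : Int) := by
          rw [PySem.List.len_eq, headD_len, hSD.2.1 0, ← headD_len]
        by_cases hA : x' < 0 ∨ y' > PySem.List.len s - 1 ∨ y' < 0 ∨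
            x' > PySem.List.len (s.headD []) - 1
        · rw [if_pos hA, bScan_oob]
          rw [PySem.List.len_eq, show y' = ((y'.toNat : Nat) : Int) from
            (Int.toNat_of_nonneg hvert.1).symm, PySem.List.pyGetD_natCast, PySem.List.len_eq]
          rw [hlens, hlens0] at hA
          intro hcon
          rw [hlenrow] at hcon
          omega
        · rw [if_neg hA]
          rw [hlens, hlens0] at hA
          exact ih y' x' (by omega) (by omega) (by omega) (by omega)
      · have hA : x' < 0 ∨ y' > PySem.List.len s - 1 ∨ y' < 0 ∨
            x' > PySem.List.len (s.headD []) - 1 := by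
          rw [PySem.List.len_eq, hSD.1]
          omega
        rw [if_pos hA, bScan_oob]
        rw [PySem.List.len_eq]
        omega
    · rw [if_neg hdots, if_neg (fun hc => hdots (hdot.mpr hc))]

lemma locate_agree {d s : List (List String)} (hSD : pvSD d s) (hR : pvRect d)
    (y x y1 x1 : Int) :
    aLocate s y x y1 x1 =
      (match bScan d y1 x1 (pvScanFuel d) (y + y1) (x + x1) with
       | none => ""
       | some q => pvCell s q.1 q.2) := by
  rw [aLocate]
  set y' := y + y1 with hy'
  set x' := x + x1 with hx'
  have hlens : PySem.List.len s = (d.length : Int) := by rw [PySem.List.len_eq, hSD.1]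
  have hlens0 : PySem.List.len (s.headD []) = ((d.headD []).length : Int) := by
    rw [PySem.List.len_eq, headD_len, hSD.2.1 0, ← headD_len]
  by_cases hvert : 0 ≤ y' ∧ y' < (d.length : Int)
  · have hmem : d.getD y'.toNat [] ∈ d := by
      rw [List.getD_eq_getElem d [] (by omega)]
      exact List.getElem_mem _
    have hlenrow : (d.getD y'.toNat []).length = (d.headD []).length := hR _ hmem
    by_cases hA : x' < 0 ∨ x' > PySem.List.len (s.headD []) - 1 ∨ y' < 0 ∨
        y' > PySem.List.len s - 1
    · rw [if_pos hA, bScan_oob]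
      rw [PySem.List.len_eq, show y' = ((y'.toNat : Nat) : Int) from
        (Int.toNat_of_nonneg hvert.1).symm, PySem.List.pyGetD_natCast, PySem.List.len_eq]
      rw [hlens, hlens0] at hA
      intro hcon
      rw [hlenrow] at hcon
      omega
    · rw [if_neg hA, sd_scanFuel hSD]
      rw [hlens, hlens0] at hA
      exact scan_agree hSD hR y1 x1 (pvScanFuel d) y' x' (by omega) (by omega) (by omega)
        (by rw [hlenrow]; omega)
  · have hA : x' < 0 ∨ x' > PySem.List.len (s.headD []) - 1 ∨ y' < 0 ∨
        y' > PySem.List.len s - 1 := by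
      rw [hlens]
      omega
    rw [if_pos hA, bScan_oob]
    rw [PySem.List.len_eq]
    omega

lemma getD_map_enumerate {A B : Type} (l : List A) (F : Int × A → B) (k : Nat)
    (hk : k < l.length) (dflt : B) :
    ((PySem.List.enumerate l).map F).getD k dflt = F ((k : Int), l[k]) := by
  rw [List.getD_eq_getElem?_getD, List.getElem?_map, PySem.List.getElem?_enumerate,
    List.getElem?_eq_getElem hk]
  simp

lemma table_lookup (d : List (List String)) (r c : Nat)
    (hr : r < d.length) (hc : c < (d.getD r []).length)
    (hseat : (d.getD r []).getD c "" = "L" ∨ (d.getD r []).getD c "" = "#") :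
    bNbrs (bTable d) (r : Int) (c : Int) =
      bDirs.filterMap (fun dir =>
        bScan d dir.1 dir.2 (pvScanFuel d) ((r : Int) + dir.1) ((c : Int) + dir.2)) := by
  rw [List.getD_eq_getElem d [] hr] at hc
  rw [List.getD_eq_getElem d [] hr, List.getD_eq_getElem (d[r]) "" hc] at hseat
  rw [bNbrs, bTable]
  simp only [PySem.List.pyGetD_natCast]
  rw [getD_map_enumerate d _ r hr]
  rw [getD_map_enumerate (d[r]) _ c hc]
  rw [if_pos (by rcases hseat with h | h <;> simp [h])]


lemma go_hash : ∀ (cs : List Char) (fuel acc : Nat), cs.length ≤ fuel →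
    PySem.Chars.count.go ['#'] fuel cs acc = acc + cs.count '#' := by
  intro cs
  induction cs with
  | nil => intro fuel acc _; cases fuel <;> simp [PySem.Chars.count.go]
  | cons c t ih =>
    intro fuel acc h
    cases fuel with
    | zero => simp at h
    | succ f =>
      rw [show PySem.Chars.count.go ['#'] (f+1) (c :: t) acc =
          (if ['#'].isPrefixOf (c :: t) then
            PySem.Chars.count.go ['#'] f (List.drop 1 (c :: t)) (acc + 1)
          else PySem.Chars.count.go ['#'] f t acc) from rfl]
      by_cases hc : c = '#'
      · rw [if_pos (by simp [List.isPrefixOf, hc])]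
        simp only [List.drop_one, List.tail_cons]
        rw [ih f (acc + 1) (by simpa using h)]
        simp [hc]
        omega
      · rw [if_neg (by simp [List.isPrefixOf]; exact fun hcon => hc hcon.symm)]
        rw [ih f acc (by simpa using h)]
        simp [hc]

lemma count_hash (t : String) : PySem.Str.count t "#" = t.toList.count '#' := by
  rw [PySem.Str.count_eq, show ("#" : String).toList = ['#'] from rfl, PySem.Chars.count]
  rw [if_neg (by simp)]
  rw [go_hash t.toList t.toList.length 0 le_rfl]
  simp

lemma intercalate_nil_flatten : ∀ (xs : List (List Char)),
    List.intercalate ([] : List Char) xs = xs.flatten := by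
  intro xs
  induction xs with
  | nil => rfl
  | cons a t ih =>
    cases t with
    | nil => simp [List.intercalate]
    | cons b u =>
      simp only [List.intercalate, List.intersperse] at ih ⊢
      simp [ih]

lemma countJoin (l : List String) :
    PySem.Str.count (PySem.Str.join "" l) "#" =
      (l.map (fun t => PySem.Str.count t "#")).sum := by
  rw [count_hash, PySem.Str.toList_join, show ("" : String).toList = [] from rfl,
    PySem.Chars.join, intercalate_nil_flatten]
  rw [List.count_flatten]
  rw [List.map_map]
  congr 1
  exact List.map_congr_left (fun t _ => (count_hash t).symm)

lemma hash_mem_iff (l : List (Int × Int)) (h : Int × Int → Option (Int × Int))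
    (G : Int × Int → String) :
    "#" ∈ l.map (fun st => match h st with | none => "" | some q => G q)
      ↔ ∃ q ∈ l.filterMap h, G q = "#" := by
  constructor
  · intro hm
    obtain ⟨a, ha, hfa⟩ := List.mem_map.mp hm
    cases hh : h a with
    | none => rw [hh] at hfa; simp at hfa
    | some q =>
      rw [hh] at hfa
      exact ⟨q, List.mem_filterMap.mpr ⟨a, ha, hh⟩, hfa⟩
  · rintro ⟨q, hq, hG⟩
    obtain ⟨a, ha, hh⟩ := List.mem_filterMap.mp hq
    exact List.mem_map.mpr ⟨a, ha, by rw [hh]; exact hG⟩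

lemma sum_count_match (s : List (List String)) (l : List (Int × Int))
    (h : Int × Int → Option (Int × Int)) :
    ((l.map (fun st => match h st with | none => "" | some q => pvCell s q.1 q.2)).map
        (fun t => PySem.Str.count t "#")).sum
      = ((l.filterMap h).map (fun q => PySem.Str.count (pvCell s q.1 q.2) "#")).sum := by
  induction l with
  | nil => rfl
  | cons a t ih =>
    cases hh : h a with
    | none =>
      simp only [List.map_cons, List.filterMap_cons, hh, List.sum_cons, ih]
      rw [show PySem.Str.count "" "#" = 0 from rfl]
      omega
    | some q =>
      simp only [List.map_cons, List.filterMap_cons, hh, List.sum_cons]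
      rw [ih]

-- indices coming out of PySem.List.enumerate
lemma enum_elim {A : Type} {l : List A} {p : Int × A} (hp : p ∈ PySem.List.enumerate l) :
    ∃ (k : Nat) (_ : k < l.length), p = ((k : Int), l[k]) := by
  obtain ⟨k, hk, hpk⟩ := (PySem.List.mem_enumerate_iff _ _ _).mp hp
  exact ⟨k, hk, by simpa using hpk⟩

lemma neigh_agree {d s : List (List String)} (hSD : pvSD d s) (hR : pvRect d)
    (k j : Nat) :
    aNextNeighbor s (k : Int) (j : Int) =
      bDirs.map (fun st =>
        match bScan d st.1 st.2 (pvScanFuel d) ((k : Int) + st.1) ((j : Int) + st.2) with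
        | none => ""
        | some q => pvCell s q.1 q.2) := by
  rw [aNextNeighbor, show aSteps = bDirs from rfl]
  exact List.map_congr_left (fun st _ => locate_agree hSD hR (k : Int) (j : Int) st.1 st.2)

lemma row_bound {d s : List (List String)} (hSD : pvSD d s) {k : Nat} (hk : k < s.length)
    {j : Nat} (hj : j < s[k].length) : j < (d.getD k []).length := by
  have h := hSD.2.1 k
  rw [List.getD_eq_getElem s [] hk] at h
  omega

lemma seat_d {d s : List (List String)} (hSD : pvSD d s) {k j : Nat}
    (hk : k < s.length) (hj : j < s[k].length)
    (hs : s[k][j] = "L" ∨ s[k][j] = "#") :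
    (d.getD k []).getD j "" = "L" ∨ (d.getD k []).getD j "" = "#" := by
  have hcell := hSD.2.2 k j
  rw [cellN_in s k j hk hj] at hcell
  rcases hcell with heq | ⟨_, hd⟩
  · rw [pvCellN] at heq; rw [← heq]; exact hs
  · exact hd

lemma cnt_agree {d s : List (List String)} (hSD : pvSD d s) (hR : pvRect d)
    {k j : Nat} (hk : k < s.length) (hj : j < s[k].length)
    (hseat : (d.getD k []).getD j "" = "L" ∨ (d.getD k []).getD j "" = "#") :
    PySem.Str.count (PySem.Str.join "" (aNextNeighbor s (k : Int) (j : Int))) "#"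
      = bCount (bTable d) s (k : Int) (j : Int) := by
  rw [countJoin, neigh_agree hSD hR k j, sum_count_match,
    ← table_lookup d k j (hSD.1 ▸ hk) (row_bound hSD hk hj) hseat]
  rfl

lemma occ_agree {d s : List (List String)} (hSD : pvSD d s) (hR : pvRect d) :
    aOccupy s false = bOcc (bTable d) s := by
  rw [aOccupy, bOcc]
  refine List.map_congr_left ?_
  intro rrow hrrow
  obtain ⟨k, hk, hrr⟩ := enum_elim hrrow
  subst hrr
  refine List.map_congr_left ?_
  intro ccol hccol
  obtain ⟨j, hj, hcc⟩ := enum_elim hccol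
  subst hcc
  simp only
  by_cases hL : s[k][j] = "L"
  · have hnb := table_lookup d k j (hSD.1 ▸ hk) (row_bound hSD hk hj)
      (seat_d hSD hk hj (Or.inl hL))
    have hiff : ("#" ∈ aNextNeighbor s (k : Int) (j : Int)) ↔
        ((bNbrs (bTable d) (k : Int) (j : Int)).any
          (fun q => pvCell s q.1 q.2 == "#") = true) := by
      rw [neigh_agree hSD hR k j, hnb, hash_mem_iff, List.any_eq_true]
      exact exists_congr fun q => by simp
    by_cases hmem : "#" ∈ aNextNeighbor s (k : Int) (j : Int)
    · simp [hL, hmem, hiff.mp hmem]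
    · have hany : ¬ ((bNbrs (bTable d) (k : Int) (j : Int)).any
          (fun q => pvCell s q.1 q.2 == "#") = true) := fun hc => hmem (hiff.mpr hc)
      simp [hL, hmem, hany]
  · simp [hL]


-- A's clear pass, per cell: the written value and the 1/0 contribution to tot
def clrCellA (g : List (List String)) (r c : Int) (col : String) : String :=
  if col = "#" then
    if ((PySem.Str.count (PySem.Str.join "" (aNextNeighbor g r c)) "#" : Int) ≥ 4 + 1)
    then "L" else col
  else col

def clrAddA (g : List (List String)) (r c : Int) (col : String) : Int :=
  if col = "#" then
    if ((PySem.Str.count (PySem.Str.join "" (aNextNeighbor g r c)) "#" : Int) ≥ 4 + 1)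
    then 0 else 1
  else 0

-- the fold bodies of aClear at part1 = 1, named so the fold can be reshaped
def clrInnerBody (g : List (List String)) (r : Int) :
    List String × Int → Int × String → List String × Int :=
  fun ac2 ccol =>
    if ccol.2 = "#" then
      let neigh := if (1 : Int) = 0 then aCheckNeighbors g r ccol.1
                   else aNextNeighbor g r ccol.1
      let count := PySem.Str.count (PySem.Str.join "" neigh) "#"
      if (count : Int) ≥ 4 + 1 then (ac2.1 ++ ["L"], ac2.2)
      else (ac2.1 ++ [ccol.2], ac2.2 + 1)
    else (ac2.1 ++ [ccol.2], ac2.2)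

def clrOuterBody (g : List (List String)) :
    List (List String) × Int → Int × List String → List (List String) × Int :=
  fun acc rrow =>
    let inner := (PySem.List.enumerate rrow.2).foldl (clrInnerBody g rrow.1) ([], acc.2)
    (acc.1 ++ [inner.1], inner.2)

lemma clrInner_step (g : List (List String)) (r : Int) (init : List String × Int)
    (a : Int × String) :
    clrInnerBody g r init a =
      (init.1 ++ [clrCellA g r a.1 a.2], init.2 + clrAddA g r a.1 a.2) := by
  simp only [clrInnerBody, clrCellA, clrAddA, if_neg (show ¬ ((1:Int) = 0) by norm_num)]
  split_ifs <;> simp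

lemma inner_eq (g : List (List String)) (r : Int) :
    ∀ (E : List (Int × String)) (init : List String × Int),
      E.foldl (clrInnerBody g r) init =
        (init.1 ++ E.map (fun ccol => clrCellA g r ccol.1 ccol.2),
         init.2 + (E.map (fun ccol => clrAddA g r ccol.1 ccol.2)).sum) := by
  intro E
  induction E with
  | nil => intro init; simp
  | cons a t ih =>
    intro init
    rw [List.foldl_cons, ih, clrInner_step]
    simp [add_assoc]

lemma outer_eq (g : List (List String)) :
    ∀ (E : List (Int × List String)) (init : List (List String) × Int),
      E.foldl (clrOuterBody g) init =
        (init.1 ++ E.map (fun rrow =>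
            (PySem.List.enumerate rrow.2).map (fun ccol => clrCellA g rrow.1 ccol.1 ccol.2)),
         init.2 + (E.map (fun rrow =>
            ((PySem.List.enumerate rrow.2).map
              (fun ccol => clrAddA g rrow.1 ccol.1 ccol.2)).sum)).sum) := by
  intro E
  induction E with
  | nil => intro init; simp
  | cons a t ih =>
    intro init
    rw [List.foldl_cons, show clrOuterBody g init a =
      (init.1 ++ [(PySem.List.enumerate a.2).map (fun ccol => clrCellA g a.1 ccol.1 ccol.2)],
       init.2 + ((PySem.List.enumerate a.2).map
         (fun ccol => clrAddA g a.1 ccol.1 ccol.2)).sum) by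
        rw [clrOuterBody]
        simp only [inner_eq]
        simp, ih]
    simp [add_assoc]

lemma aClear_eq (g : List (List String)) :
    aClear g 1 =
      ((PySem.List.enumerate g).map (fun rrow =>
          (PySem.List.enumerate rrow.2).map (fun ccol => clrCellA g rrow.1 ccol.1 ccol.2)),
       ((PySem.List.enumerate g).map (fun rrow =>
          ((PySem.List.enumerate rrow.2).map
            (fun ccol => clrAddA g rrow.1 ccol.1 ccol.2)).sum)).sum) := by
  have h := outer_eq g (PySem.List.enumerate g) ([], 0)
  exact (show aClear g 1 = (PySem.List.enumerate g).foldl (clrOuterBody g) ([], 0) from rfl).trans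
    (by simpa using h)

lemma clr_agree {d s : List (List String)} (hSD : pvSD d s) (hR : pvRect d) :
    aClear s 1 = (bClr (bTable d) s, bTot (bTable d) s) := by
  rw [aClear_eq, bClr, bTot]
  refine Prod.ext ?_ ?_
  · simp only
    refine List.map_congr_left ?_
    intro rrow hrrow
    obtain ⟨k, hk, hrr⟩ := enum_elim hrrow
    subst hrr
    refine List.map_congr_left ?_
    intro ccol hccol
    obtain ⟨j, hj, hcc⟩ := enum_elim hccol
    subst hcc
    simp only
    by_cases hcol : s[k][j] = "#"
    · rw [clrCellA, cnt_agree hSD hR hk hj (seat_d hSD hk hj (Or.inr hcol))]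
      by_cases h5 : 5 ≤ bCount (bTable d) s (k : Int) (j : Int)
      · simp [hcol, h5]
      · simp [hcol, h5]
    · simp [clrCellA, hcol]
  · simp only
    congr 1
    refine List.map_congr_left ?_
    intro rrow hrrow
    obtain ⟨k, hk, hrr⟩ := enum_elim hrrow
    subst hrr
    congr 1
    refine List.map_congr_left ?_
    intro ccol hccol
    obtain ⟨j, hj, hcc⟩ := enum_elim hccol
    subst hcc
    simp only
    by_cases hcol : s[k][j] = "#"
    · rw [clrAddA, cnt_agree hSD hR hk hj (seat_d hSD hk hj (Or.inr hcol))]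
      by_cases h5 : 5 ≤ bCount (bTable d) s (k : Int) (j : Int)
      · simp [hcol, h5]
      · simp [hcol, h5]
    · simp [clrAddA, hcol]


lemma len_mapGrid (s : List (List String)) (F : Int → Int → String → String) :
    ((PySem.List.enumerate s).map (fun rrow =>
      (PySem.List.enumerate rrow.2).map (fun ccol => F rrow.1 ccol.1 ccol.2))).length
      = s.length := by
  simp [PySem.List.length_enumerate]

lemma rowlen_mapGrid (s : List (List String)) (F : Int → Int → String → String) (r : Nat) :
    (((PySem.List.enumerate s).map (fun rrow =>
      (PySem.List.enumerate rrow.2).map (fun ccol => F rrow.1 ccol.1 ccol.2))).getD r []).length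
      = (s.getD r []).length := by
  by_cases hr : r < s.length
  · rw [getD_map_enumerate s _ r hr, List.getD_eq_getElem s [] hr]
    simp [PySem.List.length_enumerate]
  · rw [List.getD_eq_default _ _ (by rw [len_mapGrid]; omega),
      List.getD_eq_default _ _ (by omega)]

lemma cell_mapGrid (s : List (List String)) (F : Int → Int → String → String)
    (r c : Nat) (hr : r < s.length) (hc : c < s[r].length) :
    pvCellN ((PySem.List.enumerate s).map (fun rrow =>
        (PySem.List.enumerate rrow.2).map (fun ccol => F rrow.1 ccol.1 ccol.2))) r c
      = F (r : Int) (c : Int) (s[r][c]) := by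
  rw [pvCellN, getD_map_enumerate s _ r hr, getD_map_enumerate (s[r]) _ c hc]

lemma sd_mapGrid {d s : List (List String)} (h : pvSD d s)
    (F : Int → Int → String → String)
    (hF : ∀ r c col, F r c col = col ∨
      ((col = "L" ∨ col = "#") ∧ (F r c col = "L" ∨ F r c col = "#"))) :
    pvSD d ((PySem.List.enumerate s).map (fun rrow =>
      (PySem.List.enumerate rrow.2).map (fun ccol => F rrow.1 ccol.1 ccol.2))) := by
  refine ⟨by rw [len_mapGrid]; exact h.1, fun r => by rw [rowlen_mapGrid]; exact h.2.1 r, ?_⟩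
  intro r c
  by_cases hr : r < s.length
  · by_cases hc : c < s[r].length
    · rw [cell_mapGrid s F r c hr hc]
      have hcell := h.2.2 r c
      rw [cellN_in s r c hr hc] at hcell
      rcases hF (r : Int) (c : Int) (s[r][c]) with heq | ⟨hcols, hnews⟩
      · rw [heq]; exact hcell
      · rcases hcell with heq' | ⟨_, hd⟩
        · exact Or.inr ⟨hnews, heq' ▸ hcols⟩
        · exact Or.inr ⟨hnews, hd⟩
    · have hout : ¬ (r < s.length ∧ c < (s.getD r []).length) := by
        rw [List.getD_eq_getElem s [] hr]; omega
      have hout' : ¬ (r < ((PySem.List.enumerate s).map (fun rrow =>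
          (PySem.List.enumerate rrow.2).map (fun ccol => F rrow.1 ccol.1 ccol.2))).length ∧
          c < (((PySem.List.enumerate s).map (fun rrow =>
          (PySem.List.enumerate rrow.2).map (fun ccol => F rrow.1 ccol.1 ccol.2))).getD r []).length) := by
        rw [len_mapGrid, rowlen_mapGrid, List.getD_eq_getElem s [] hr]; omega
      rw [cellN_out _ r c hout']
      have hcell := h.2.2 r c
      rw [cellN_out s r c hout] at hcell
      exact hcell
  · have hout : ¬ (r < s.length ∧ c < (s.getD r []).length) := by omega
    have hout' : ¬ (r < ((PySem.List.enumerate s).map (fun rrow =>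
        (PySem.List.enumerate rrow.2).map (fun ccol => F rrow.1 ccol.1 ccol.2))).length ∧
        c < (((PySem.List.enumerate s).map (fun rrow =>
        (PySem.List.enumerate rrow.2).map (fun ccol => F rrow.1 ccol.1 ccol.2))).getD r []).length) := by
      rw [len_mapGrid]; omega
    rw [cellN_out _ r c hout']
    have hcell := h.2.2 r c
    rw [cellN_out s r c hout] at hcell
    exact hcell

lemma sd_bOcc {d s : List (List String)} (tab : List (List (List (Int × Int))))
    (h : pvSD d s) : pvSD d (bOcc tab s) := by
  refine sd_mapGrid h (fun r c col =>
    if col == "L" && !((bNbrs tab r c).any fun q => pvCell s q.1 q.2 == "#") then "#"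
    else col) ?_
  intro r c col
  dsimp only
  by_cases hcond : (col == "L" && !((bNbrs tab r c).any fun q => pvCell s q.1 q.2 == "#")) = true
  · have hL : col = "L" := by
      have := (Bool.and_eq_true _ _).mp hcond
      exact beq_iff_eq.mp this.1
    rw [if_pos hcond]
    exact Or.inr ⟨Or.inl hL, Or.inr rfl⟩
  · rw [if_neg hcond]
    exact Or.inl rfl

lemma sd_bClr {d s : List (List String)} (tab : List (List (List (Int × Int))))
    (h : pvSD d s) : pvSD d (bClr tab s) := by
  refine sd_mapGrid h (fun r c col =>
    if col == "#" && decide (5 ≤ bCount tab s r c) then "L" else col) ?_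
  intro r c col
  dsimp only
  by_cases hcond : (col == "#" && decide (5 ≤ bCount tab s r c)) = true
  · have hH : col = "#" := by
      have := (Bool.and_eq_true _ _).mp hcond
      exact beq_iff_eq.mp this.1
    rw [if_pos hcond]
    exact Or.inr ⟨Or.inr hH, Or.inl rfl⟩
  · rw [if_neg hcond]
    exact Or.inl rfl

lemma loop_agree (d : List (List String)) (hR : pvRect d) :
    ∀ (f : Nat) (cur prev : List (List String)) (i tot : Int), pvSD d cur →
      aLoop f cur prev i tot = bLoop (bTable d) f cur prev i tot := by
  intro f
  induction f with
  | zero => intro cur prev i tot _; rfl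
  | succ f ih =>
    intro cur prev i tot hSD
    by_cases hcp : cur = prev
    · simp [aLoop, bLoop, hcp]
    · by_cases hm : PySem.Int.mod i 2 = 0
      · simp only [aLoop, bLoop, if_neg hcp, if_pos hm]
        rw [occ_agree hSD hR]
        exact ih _ _ _ _ (sd_bOcc _ hSD)
      · simp only [aLoop, bLoop, if_neg hcp, if_neg hm]
        rw [clr_agree hSD hR]
        exact ih _ _ _ _ (sd_bClr _ hSD)

lemma grid_id (s : List (List String)) (F : Int → Int → String → String)
    (h : ∀ rrow ∈ PySem.List.enumerate s, ∀ ccol ∈ PySem.List.enumerate rrow.2,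
          F rrow.1 ccol.1 ccol.2 = ccol.2) :
    (PySem.List.enumerate s).map (fun rrow =>
      (PySem.List.enumerate rrow.2).map (fun ccol => F rrow.1 ccol.1 ccol.2)) = s := by
  have step : ∀ rrow ∈ PySem.List.enumerate s,
      (PySem.List.enumerate rrow.2).map (fun ccol => F rrow.1 ccol.1 ccol.2) = rrow.2 := by
    intro rrow hr
    rw [List.map_congr_left (fun ccol hc => h rrow hr ccol hc)]
    exact PySem.List.map_snd_enumerate rrow.2 0
  rw [List.map_congr_left step]
  exact PySem.List.map_snd_enumerate s 0

-- ===== VERDICT (by name: the statement is the Claim_ definition above) =====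
theorem seating2_spec : Claim_equal_seating2 := by
  intro data _ hPre
  unfold Spec_seating2
  by_cases hnil : data = []
  · subst hnil; rfl
  · cases hPre with
    | inl hRect =>
      rw [seating2, seating2_alt, if_neg (fun h => hnil (List.length_eq_zero_iff.mp h))]
      exact loop_agree data hRect _ _ _ _ _ (sd_refl data)
    | inr hSeat =>
      have hidA : aOccupy data false = data := by
        refine grid_id data (fun r c col =>
          if col = "L" then
            (if "#" ∉ (if false then aCheckNeighbors data r c else aNextNeighbor data r c)
             then "#" else col)
          else col) ?_
        intro rrow hr ccol hc
        obtain ⟨k, hk, hrr⟩ := enum_elim hr; subst hrr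
        obtain ⟨j, hj, hcc⟩ := enum_elim hc; subst hcc
        dsimp only
        have hne := (hSeat _ (List.getElem_mem hk) _ (List.getElem_mem hj)).1
        rw [if_neg hne]
      have hidB : bOcc (bTable data) data = data := by
        refine grid_id data (fun r c col =>
          if col == "L" && !((bNbrs (bTable data) r c).any fun q => pvCell data q.1 q.2 == "#")
          then "#" else col) ?_
        intro rrow hr ccol hc
        obtain ⟨k, hk, hrr⟩ := enum_elim hr; subst hrr
        obtain ⟨j, hj, hcc⟩ := enum_elim hc; subst hcc
        dsimp only
        have hne := (hSeat _ (List.getElem_mem hk) _ (List.getElem_mem hj)).1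
        rw [if_neg (by simp [hne])]
      rw [seating2, seating2_alt, if_neg (fun h => hnil (List.length_eq_zero_iff.mp h))]
      obtain ⟨m, hm⟩ : ∃ m, pvLoopFuel data = m + 2 := ⟨_, rfl⟩
      rw [hm]
      show aLoop (m+1+1) data [] 0 0 = bLoop (bTable data) (m+1+1) data [] 0 0
      rw [show aLoop (m+1+1) data [] 0 0 = aLoop (m+1) (aOccupy data false) data 1 0 by
            simp [aLoop, hnil],
          show bLoop (bTable data) (m+1+1) data [] 0 0 =
              bLoop (bTable data) (m+1) (bOcc (bTable data) data) data 1 0 by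
            simp [bLoop, hnil],
          hidA, hidB]
      simp [aLoop, bLoop]
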